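-- pv_equiv track=rewrite | github.com/sudoStacks/retreivr | engine/stack_setup.py | derive_profiles
-- ===== SOURCE A (Python) =====
-- from typing import Any
--
-- PROFILE_MAP = {
--     "enable_arr_stack": "arr",
--     "enable_qbittorrent": "downloader",
--     "enable_vpn": "vpn",
--     "enable_jellyfin": "jellyfin",
--     "enable_bazarr": "subtitles",
--     "enable_readarr": "books",
-- }
--
-- def derive_profiles(stack: dict[str, Any]) -> list[str]:
--     profiles: list[str] = []
--     if any(bool(stack.get(key)) for key in ("enable_radarr", "enable_sonarr", "enable_readarr", "enable_prowlarr", "enable_arr_stack")):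
--         profiles.append("arr")
--     for key, profile in PROFILE_MAP.items():
--         if profile == "arr":
--             continue
--         if bool(stack.get(key)) and profile not in profiles:
--             profiles.append(profile)
--     if bool(stack.get("enable_hostctl")) and "hostctl" not in profiles:
--         profiles.append("hostctl")
--     return profiles
-- ===== SOURCE B (Python) =====
-- _KEY_PROFILES = {
--     "enable_radarr": ("arr",),
--     "enable_sonarr": ("arr",),
--     "enable_readarr": ("arr", "books"),
--     "enable_prowlarr": ("arr",),
--     "enable_arr_stack": ("arr",),
--     "enable_qbittorrent": ("downloader",),
--     "enable_vpn": ("vpn",),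
--     "enable_jellyfin": ("jellyfin",),
--     "enable_bazarr": ("subtitles",),
--     "enable_hostctl": ("hostctl",),
-- }
--
-- _ORDER = ("arr", "downloader", "vpn", "jellyfin", "subtitles", "books", "hostctl")
--
-- def derive_profiles(stack):
--     hit = set()
--     for key, value in stack.items():
--         if value:
--             hit.update(_KEY_PROFILES.get(key, ()))
--     return [profile for profile in _ORDER if profile in hit]
-- ===== Notes on version B (the rewrite author's own statement) =====
-- stated objective: alternative
-- what changed: B inverts the traversal: instead of A's three flag-table mechanisms that each query the stack (any() over five keys, the PROFILE_MAP loop with a skip and membership test, and a hostctl guard), B makes a single pass over the stack's own entries accumulating a set of triggered profiles via a key-to-profiles map, then emits the fixed profile order filtered by that set. Pre_ excludes only association lists with duplicate keys, which do not represent a Python dict (A's argument type).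
import Mathlib
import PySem

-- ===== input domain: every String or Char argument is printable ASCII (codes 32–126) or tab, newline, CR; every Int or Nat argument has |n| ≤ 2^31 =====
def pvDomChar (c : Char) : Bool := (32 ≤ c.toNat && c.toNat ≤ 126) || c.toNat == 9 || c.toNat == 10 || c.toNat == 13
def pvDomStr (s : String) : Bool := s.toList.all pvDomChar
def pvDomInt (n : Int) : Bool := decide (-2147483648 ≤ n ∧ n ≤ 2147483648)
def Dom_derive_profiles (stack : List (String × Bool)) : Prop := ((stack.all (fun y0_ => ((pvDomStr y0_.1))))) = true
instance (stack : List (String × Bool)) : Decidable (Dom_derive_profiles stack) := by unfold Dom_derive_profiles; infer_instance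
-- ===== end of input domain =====

-- B inverts the traversal: one pass over the stack's entries accumulating a set of triggered
-- profiles via a key→profiles map, then the fixed profile order filtered by that set
-- (objective: alternative; A instead queries the stack per flag table entry).


-- ===== PORT A =====
-- bool(stack.get(k)) on the bool-valued dict: first-match lookup, default False
def pvGetTruthy (stack : List (String × Bool)) (k : String) : Bool :=
  (stack.lookup k).getD false

def PROFILE_MAP : List (String × String) :=
  [("enable_arr_stack", "arr"), ("enable_qbittorrent", "downloader"),
   ("enable_vpn", "vpn"), ("enable_jellyfin", "jellyfin"),
   ("enable_bazarr", "subtitles"), ("enable_readarr", "books")]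

def derive_profiles (stack : List (String × Bool)) : List String :=
  let profiles : List String :=
    if ["enable_radarr", "enable_sonarr", "enable_readarr", "enable_prowlarr",
        "enable_arr_stack"].any (fun key => pvGetTruthy stack key)
    then [] ++ ["arr"] else []
  let profiles := PROFILE_MAP.foldl (fun profiles kp =>
    if kp.2 == "arr" then profiles
    else if pvGetTruthy stack kp.1 && !(profiles.contains kp.2)
    then profiles ++ [kp.2] else profiles) profiles
  if pvGetTruthy stack "enable_hostctl" && !(profiles.contains "hostctl")
  then profiles ++ ["hostctl"] else profiles

-- ===== PORT B =====
def KEY_PROFILES : List (String × List String) :=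
  [("enable_radarr", ["arr"]), ("enable_sonarr", ["arr"]),
   ("enable_readarr", ["arr", "books"]), ("enable_prowlarr", ["arr"]),
   ("enable_arr_stack", ["arr"]), ("enable_qbittorrent", ["downloader"]),
   ("enable_vpn", ["vpn"]), ("enable_jellyfin", ["jellyfin"]),
   ("enable_bazarr", ["subtitles"]), ("enable_hostctl", ["hostctl"])]

def ORDER : List String :=
  ["arr", "downloader", "vpn", "jellyfin", "subtitles", "books", "hostctl"]

-- _KEY_PROFILES.get(key, ()): first-match lookup, default empty
def pvProfilesOf (k : String) : List String :=
  (KEY_PROFILES.lookup k).getD []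

def derive_profiles_alt (stack : List (String × Bool)) : List String :=
  let hit : PySem.Set String :=
    stack.foldl (fun hit kv =>
      if kv.2 then PySem.Set.update hit (pvProfilesOf kv.1) else hit)
      PySem.Set.empty
  ORDER.filter (fun profile => PySem.Set.contains hit profile)

-- ===== PRECONDITION & SPEC =====
-- Pre_ excludes only association lists with duplicate keys: those do not represent a Python
-- dict (A's argument type), so any behaviour on them is an artefact of the list encoding.
def Pre_derive_profiles (stack : List (String × Bool)) : Prop :=
  (stack.map Prod.fst).Nodup
instance (stack : List (String × Bool)) : Decidable (Pre_derive_profiles stack) := by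
  unfold Pre_derive_profiles; infer_instance

def pvWitness_derive_profiles : (List (String × Bool)) :=
  [("enable_readarr", true), ("enable_hostctl", false)]

def Spec_derive_profiles (stack : List (String × Bool)) (out : List String) : Prop := out = derive_profiles_alt stack
instance (stack : List (String × Bool)) (out : List String) : Decidable (Spec_derive_profiles stack out) := by unfold Spec_derive_profiles; infer_instance

-- ===== CLAIM =====
def Claim_equal_derive_profiles : Prop := ∀ (stack : List (String × Bool)), Dom_derive_profiles stack → Pre_derive_profiles stack → Spec_derive_profiles stack (derive_profiles stack)

-- ===== LEMMAS AND PROOFS =====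

-- membership in B's accumulated set of triggered profiles
theorem pv_mem_hit (stack : List (String × Bool)) (s : PySem.Set String) (p : String) :
    (p ∈ stack.foldl (fun hit kv =>
        if kv.2 then PySem.Set.update hit (pvProfilesOf kv.1) else hit) s) ↔
      p ∈ s ∨ ∃ kv ∈ stack, kv.2 = true ∧ p ∈ pvProfilesOf kv.1 := by
  induction stack generalizing s with
  | nil => simp
  | cons kv rest ih =>
    rcases kv with ⟨k, v⟩
    cases v <;> simp [ih, PySem.Set.mem_update]
    tauto

-- first-match lookup on a duplicate-free association list is membership of (k, true)
theorem pv_lookup_nodup (stack : List (String × Bool)) (k : String)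
    (h : (stack.map Prod.fst).Nodup) :
    (pvGetTruthy stack k = true ↔ (k, true) ∈ stack) := by
  induction stack with
  | nil => simp [pvGetTruthy]
  | cons kv rest ih =>
    rcases kv with ⟨k', v⟩
    simp only [List.map_cons, List.nodup_cons] at h
    by_cases hk : k = k'
    · subst hk
      simp only [pvGetTruthy, List.lookup, beq_self_eq_true, Option.getD_some]
      constructor
      · intro hv; subst hv; exact List.mem_cons_self
      · intro hmem
        rcases List.mem_cons.1 hmem with heq | hmem'
        · exact (congrArg Prod.snd heq).symm
        · exact absurd (List.mem_map_of_mem (f := Prod.fst) hmem') (by simpa using h.1)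
    · have hb : (k == k') = false := by simp [hk]
      simp only [pvGetTruthy, List.lookup, hb] at *
      rw [ih h.2]
      constructor
      · intro hm; exact List.mem_cons_of_mem _ hm
      · intro hm
        rcases List.mem_cons.1 hm with heq | hm'
        · exact absurd (congrArg Prod.fst heq) hk
        · exact hm'

-- getD-[] lookup on a duplicate-free association list, as an existential over its entries
theorem pv_assoc_mem {α : Type} (L : List (String × List α)) (k : String) (x : α)
    (h : (L.map Prod.fst).Nodup) :
    x ∈ (L.lookup k).getD [] ↔ ∃ kl ∈ L, kl.1 = k ∧ x ∈ kl.2 := by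
  induction L with
  | nil => simp
  | cons kl rest ih =>
    rcases kl with ⟨k', l⟩
    simp only [List.map_cons, List.nodup_cons] at h
    by_cases hk : k = k'
    · subst hk
      simp only [List.lookup, beq_self_eq_true, Option.getD_some]
      constructor
      · intro hx; exact ⟨(k, l), List.mem_cons_self, rfl, hx⟩
      · rintro ⟨⟨k2, l2⟩, hmem, hkeq, hx⟩
        rcases List.mem_cons.1 hmem with heq | hmem'
        · cases heq; exact hx
        · exact absurd (hkeq ▸ List.mem_map_of_mem (f := Prod.fst) hmem') (by simpa using h.1)
    · have hb : (k == k') = false := by simp [hk]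
      simp only [List.lookup, hb]
      rw [ih h.2]
      constructor
      · rintro ⟨kl2, hmem, hkeq, hx⟩; exact ⟨kl2, List.mem_cons_of_mem _ hmem, hkeq, hx⟩
      · rintro ⟨kl2, hmem, hkeq, hx⟩
        rcases List.mem_cons.1 hmem with heq | hmem'
        · exact absurd (heq ▸ hkeq : (k', l).1 = k) (fun hh => hk hh.symm)
        · exact ⟨kl2, hmem', hkeq, hx⟩

theorem pv_profilesOf_mem (k p : String) :
    p ∈ pvProfilesOf k ↔ ∃ kl ∈ KEY_PROFILES, kl.1 = k ∧ p ∈ kl.2 :=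
  pv_assoc_mem KEY_PROFILES k p (by decide)

theorem pv_B_explicit (stack : List (String × Bool)) (h : (stack.map Prod.fst).Nodup) :
    derive_profiles_alt stack =
      ORDER.filter (fun p =>
        KEY_PROFILES.any (fun kl => kl.2.contains p && pvGetTruthy stack kl.1)) := by
  unfold derive_profiles_alt
  apply List.filter_congr
  intro p _
  rw [Bool.eq_iff_iff]
  rw [PySem.Set.contains_iff]
  rw [pv_mem_hit]
  rw [List.any_eq_true]
  constructor
  · rintro (hs | ⟨kv, hmem, hv, hp⟩)
    · simp [PySem.Set.empty] at hs
    · rw [pv_profilesOf_mem] at hp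
      obtain ⟨kl, hkl, hk, hpl⟩ := hp
      refine ⟨kl, hkl, ?_⟩
      simp only [Bool.and_eq_true, List.contains_iff_mem] at *
      have hkv : (kl.1, true) = kv := by rw [hk, ← hv]
      exact ⟨by simpa using hpl, (pv_lookup_nodup stack kl.1 h).2 (hkv ▸ hmem)⟩
  · rintro ⟨kl, hkl, hb⟩
    simp only [Bool.and_eq_true, List.contains_iff_mem] at hb
    obtain ⟨hpl, hg⟩ := hb
    have hmem := (pv_lookup_nodup stack kl.1 h).1 hg
    right
    exact ⟨(kl.1, true), hmem, rfl, (pv_profilesOf_mem kl.1 p).2 ⟨kl, hkl, rfl, by simpa using hpl⟩⟩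

def pvCanon (b1 b2 b3 b4 b5 b6 b7 b8 b9 b10 : Bool) : List (String × Bool) :=
  [("enable_radarr", b1), ("enable_sonarr", b2), ("enable_readarr", b3),
   ("enable_prowlarr", b4), ("enable_arr_stack", b5), ("enable_qbittorrent", b6),
   ("enable_vpn", b7), ("enable_jellyfin", b8), ("enable_bazarr", b9),
   ("enable_hostctl", b10)]

def pvKeys : List String :=
  ["enable_radarr", "enable_sonarr", "enable_readarr", "enable_prowlarr",
   "enable_arr_stack", "enable_qbittorrent", "enable_vpn", "enable_jellyfin",
   "enable_bazarr", "enable_hostctl"]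

-- the explicit filter form only reads the stack through the ten flag lookups
theorem pv_filter_ext (x y : List (String × Bool))
    (h : ∀ k ∈ pvKeys, pvGetTruthy x k = pvGetTruthy y k) :
    ORDER.filter (fun p =>
        KEY_PROFILES.any (fun kl => kl.2.contains p && pvGetTruthy x kl.1)) =
      ORDER.filter (fun p =>
        KEY_PROFILES.any (fun kl => kl.2.contains p && pvGetTruthy y kl.1)) := by
  apply List.filter_congr
  intro p _
  simp only [KEY_PROFILES, List.any_cons, List.any_nil]
  rw [h "enable_radarr" (by decide), h "enable_sonarr" (by decide),
    h "enable_readarr" (by decide), h "enable_prowlarr" (by decide),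
    h "enable_arr_stack" (by decide), h "enable_qbittorrent" (by decide),
    h "enable_vpn" (by decide), h "enable_jellyfin" (by decide),
    h "enable_bazarr" (by decide), h "enable_hostctl" (by decide)]

-- all 1024 flag combinations on the canonical ten-entry stack
set_option maxHeartbeats 1000000 in
theorem pv_key (b1 b2 b3 b4 b5 b6 b7 b8 b9 b10 : Bool) :
    derive_profiles (pvCanon b1 b2 b3 b4 b5 b6 b7 b8 b9 b10) =
      ORDER.filter (fun p =>
        KEY_PROFILES.any (fun kl => kl.2.contains p &&
          pvGetTruthy (pvCanon b1 b2 b3 b4 b5 b6 b7 b8 b9 b10) kl.1)) := by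
  revert b1 b2 b3 b4 b5 b6 b7 b8 b9 b10
  decide

-- ===== VERDICT =====
theorem derive_profiles_spec : Claim_equal_derive_profiles := by
  intro stack _ hpre
  unfold Spec_derive_profiles
  rw [pv_B_explicit stack hpre]
  rw [pv_filter_ext stack
    (pvCanon (pvGetTruthy stack "enable_radarr") (pvGetTruthy stack "enable_sonarr")
      (pvGetTruthy stack "enable_readarr") (pvGetTruthy stack "enable_prowlarr")
      (pvGetTruthy stack "enable_arr_stack") (pvGetTruthy stack "enable_qbittorrent")
      (pvGetTruthy stack "enable_vpn") (pvGetTruthy stack "enable_jellyfin")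
      (pvGetTruthy stack "enable_bazarr") (pvGetTruthy stack "enable_hostctl"))
    (by intro k hk; fin_cases hk <;> rfl)]
  exact pv_key (pvGetTruthy stack "enable_radarr") (pvGetTruthy stack "enable_sonarr")
    (pvGetTruthy stack "enable_readarr") (pvGetTruthy stack "enable_prowlarr")
    (pvGetTruthy stack "enable_arr_stack") (pvGetTruthy stack "enable_qbittorrent")
    (pvGetTruthy stack "enable_vpn") (pvGetTruthy stack "enable_jellyfin")
    (pvGetTruthy stack "enable_bazarr") (pvGetTruthy stack "enable_hostctl")
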